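-- pv_equiv track=rewrite | github.com/xiaohuailabs/xiaohu-wechat-format | scripts/format.py | truncate_html_preview
-- ===== SOURCE A (Python) =====
-- def truncate_html_preview(html: str, max_p_tags: int = 12) -> str:
--     """截取 HTML 前 N 个 </p> 之前的内容作为预览"""
--     count = 0
--     pos = 0
--     while count < max_p_tags:
--         idx = html.find("</p>", pos)
--         if idx == -1:
--             break
--         pos = idx + len("</p>")
--         count += 1
--     if pos > 0:
--         return html[:pos]
--     return html[:2000]
-- ===== SOURCE B (Python) =====
-- def truncate_html_preview(html: str, max_p_tags: int = 12) -> str: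
--     """截取 HTML 前 N 个 </p> 之前的内容作为预览"""
--     pieces = html.split("</p>")
--     found = min(max_p_tags, len(pieces) - 1)
--     if found >= 1:
--         return "</p>".join(pieces[:found]) + "</p>"
--     return html[:2000]
-- ===== Notes on version B (the rewrite author's own statement) =====
-- stated objective: simpler
-- what changed: B splits the whole string on the closing p-tag once and rebuilds the preview by joining the first min(max_p_tags, count) segments and re-appending one closing tag, instead of A's cursor loop of repeated find calls; the 2000-character fallback fires exactly when no whole tag is taken.
import Mathlib
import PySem

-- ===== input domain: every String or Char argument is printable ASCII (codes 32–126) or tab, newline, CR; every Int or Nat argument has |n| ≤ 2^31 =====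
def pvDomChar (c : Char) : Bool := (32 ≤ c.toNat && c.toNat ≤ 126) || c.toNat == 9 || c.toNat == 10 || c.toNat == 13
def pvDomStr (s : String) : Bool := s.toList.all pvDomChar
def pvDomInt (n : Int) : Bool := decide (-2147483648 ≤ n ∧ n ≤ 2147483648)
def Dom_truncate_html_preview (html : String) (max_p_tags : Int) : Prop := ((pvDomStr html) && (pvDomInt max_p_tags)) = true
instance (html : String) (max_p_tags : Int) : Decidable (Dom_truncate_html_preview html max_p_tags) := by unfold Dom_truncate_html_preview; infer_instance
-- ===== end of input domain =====

-- B re-implements A's cursor loop of repeated find calls as one split on "</p>" followed by a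
-- join of the first min(max_p_tags, count) segments; objective: simpler (same O(n) cost).

-- ===== PORT A =====
-- the while loop: count counts up to max_p_tags, so recursion on the remaining count
def truncALoop (html : List Char) (pos : Nat) : Nat → Nat
  | 0 => pos
  | n + 1 =>
      let idx := PySem.Chars.findFrom html "</p>".toList (pos : Int)
      if idx = -1 then pos else truncALoop html (idx.toNat + 4) n

def truncate_html_preview (html : String) (max_p_tags : Int) : String :=
  let pos := truncALoop html.toList 0 max_p_tags.toNat
  if pos > 0 then String.mk (PySem.List.slice html.toList none (some (pos : Int)))
  else String.mk (PySem.List.slice html.toList none (some 2000))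

-- ===== PORT B =====
def truncate_html_preview_alt (html : String) (max_p_tags : Int) : String :=
  let pieces := PySem.Chars.splitOn html.toList "</p>".toList
  let found := min max_p_tags ((pieces.length : Int) - 1)
  if 1 ≤ found then
    String.mk (PySem.Chars.join "</p>".toList (PySem.List.slice pieces none (some found))
               ++ "</p>".toList)
  else String.mk (PySem.List.slice html.toList none (some 2000))

-- ===== PRECONDITION & SPEC =====
def Spec_truncate_html_preview (html : String) (max_p_tags : Int) (out : String) : Prop := out = truncate_html_preview_alt html max_p_tags
instance (html : String) (max_p_tags : Int) (out : String) : Decidable (Spec_truncate_html_preview html max_p_tags out) := by unfold Spec_truncate_html_preview; infer_instance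

-- ===== CLAIM (what is proved, stated in full; the proofs are below) =====
def Claim_equal_truncate_html_preview : Prop := ∀ (html : String) (max_p_tags : Int), Dom_truncate_html_preview html max_p_tags → Spec_truncate_html_preview html max_p_tags (truncate_html_preview html max_p_tags)

-- ===== LEMMAS AND PROOFS =====

-- a pure (fuel-free) mirror of PySem.Chars.splitOn.go
def splitF (sep : List Char) (l : List Char) : List (List Char) :=
  if h : sep ≠ [] ∧ sep.isPrefixOf l then
    [] :: splitF sep (l.drop sep.length)
  else
    match l with
    | [] => [[]]
    | c :: rest =>
      match splitF sep rest with
      | [] => [[c]]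
      | h :: t => (c :: h) :: t
termination_by l.length
decreasing_by
  · have hp := List.isPrefixOf_iff_prefix.mp h.2
    have h1 : 1 ≤ sep.length := by
      cases sep with
      | nil => exact absurd rfl h.1
      | cons a t => simp
    have h2 : sep.length ≤ l.length := hp.length_le
    simp
    omega
  · simp

theorem splitF_ne_nil (sep l : List Char) : splitF sep l ≠ [] := by
  rw [splitF]
  split
  · simp
  · split
    · simp
    · split <;> simp

theorem go_eq_splitF (sep : List Char) (hsep : sep ≠ []) :
    ∀ (fuel : Nat) (l cur : List Char) (acc : List (List Char)), l.length < fuel →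
      PySem.Chars.splitOn.go sep fuel l cur acc
        = acc.reverse ++ (cur.reverse ++ (splitF sep l).headI) :: (splitF sep l).tail := by
  intro fuel
  induction fuel with
  | zero => intro l cur acc h; omega
  | succ f ih =>
    intro l cur acc h
    cases l with
    | nil =>
      have : splitF sep [] = [[]] := by
        rw [splitF]
        have : ¬ sep.isPrefixOf ([] : List Char) := by
          intro hp
          exact hsep (List.prefix_nil.mp (List.isPrefixOf_iff_prefix.mp hp))
        simp [this]
      simp [PySem.Chars.splitOn.go, this]
    | cons c rest =>
      by_cases hp : sep.isPrefixOf (c :: rest)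
      · have hs : splitF sep (c :: rest) = [] :: splitF sep ((c :: rest).drop sep.length) := by
          rw [splitF]; simp [hsep, hp]
        have h1 : 1 ≤ sep.length := by
          cases sep with
          | nil => exact absurd rfl hsep
          | cons a t => simp
        have hlen : ((c :: rest).drop sep.length).length < f := by
          simp at h ⊢; omega
        have := ih ((c :: rest).drop sep.length) [] (cur.reverse :: acc) hlen
        rw [show PySem.Chars.splitOn.go sep (f+1) (c :: rest) cur acc
              = PySem.Chars.splitOn.go sep f ((c :: rest).drop sep.length) [] (cur.reverse :: acc) by
              simp [PySem.Chars.splitOn.go, hp]]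
        rw [this, hs]
        have hne := splitF_ne_nil sep ((c :: rest).drop sep.length)
        cases hD : splitF sep ((c :: rest).drop sep.length) with
        | nil => exact absurd hD hne
        | cons d0 dt => simp
      · have hR := splitF_ne_nil sep rest
        cases hRr : splitF sep rest with
        | nil => exact absurd hRr hR
        | cons r0 rt =>
          have hs : splitF sep (c :: rest) = (c :: r0) :: rt := by
            rw [splitF]; simp [hp, hRr]
          have hlen : rest.length < f := by simp at h; omega
          have := ih rest (c :: cur) acc hlen
          rw [show PySem.Chars.splitOn.go sep (f+1) (c :: rest) cur acc
                = PySem.Chars.splitOn.go sep f rest (c :: cur) acc by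
                simp [PySem.Chars.splitOn.go, hp]]
          rw [this, hRr, hs]
          simp

theorem splitOn_eq_splitF (s sep : List Char) (hsep : sep ≠ []) :
    PySem.Chars.splitOn s sep = splitF sep s := by
  have := go_eq_splitF sep hsep (s.length + 1) s [] [] (by omega)
  rw [PySem.Chars.splitOn, this]
  have hne := splitF_ne_nil sep s
  cases h : splitF sep s with
  | nil => exact absurd h hne
  | cons a t => simp

theorem splitF_of_not_infix (sep : List Char) (hsep : sep ≠ []) :
    ∀ l : List Char, ¬ sep <:+: l → splitF sep l = [l] := by
  intro l
  induction l with
  | nil =>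
    intro h
    rw [splitF]
    have : ¬ sep.isPrefixOf ([] : List Char) := by
      intro hp
      exact hsep (List.prefix_nil.mp (List.isPrefixOf_iff_prefix.mp hp))
    simp [this]
  | cons c rest ih =>
    intro h
    have hp : ¬ sep.isPrefixOf (c :: rest) := by
      intro hp
      exact h (List.isPrefixOf_iff_prefix.mp hp).isInfix
    have hr : ¬ sep <:+: rest := fun hr => h (List.infix_cons hr)
    rw [splitF]
    simp [hp, ih hr]

theorem find_eq_of (s sub : List Char) (j : Nat)
    (h1 : sub <+: s.drop j) (h2 : ∀ i < j, ¬ sub <+: s.drop i) :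
    PySem.Chars.find s sub = (j : Int) := by
  have hin : sub <:+: s := by
    have := (PySem.Chars.exists_prefix_drop_iff_isIn sub s).mp ⟨j, h1⟩
    exact (PySem.Chars.isIn_iff_infix sub s).mp this
  have hnn : 0 ≤ PySem.Chars.find s sub := (PySem.Chars.find_nonneg_iff s sub).mpr hin
  obtain ⟨hpre, hmin⟩ := PySem.Chars.find_spec hnn
  have : (PySem.Chars.find s sub).toNat = j := by
    by_contra hne
    rcases Nat.lt_or_ge (PySem.Chars.find s sub).toNat j with hlt | hge
    · exact h2 _ hlt hpre
    · exact hmin j (by omega) h1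
  omega

theorem splitF_of_infix (sep : List Char) (hsep : sep ≠ []) :
    ∀ l : List Char, sep <:+: l →
      splitF sep l = l.take (PySem.Chars.find l sep).toNat
        :: splitF sep (l.drop ((PySem.Chars.find l sep).toNat + sep.length)) := by
  intro l
  induction l with
  | nil =>
    intro h
    exact absurd (List.eq_nil_of_infix_nil h) hsep
  | cons c rest ih =>
    intro h
    by_cases hp : sep <+: (c :: rest)
    · have hf : PySem.Chars.find (c :: rest) sep = (0 : Int) := by
        have := find_eq_of (c :: rest) sep 0 (by simpa using hp) (by omega)
        simpa using this
      rw [splitF]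
      simp [hsep, List.isPrefixOf_iff_prefix.mpr hp, hf]
    · -- first occurrence inside rest
      have hpb : ¬ sep.isPrefixOf (c :: rest) := fun hb => hp (List.isPrefixOf_iff_prefix.mp hb)
      have hrest : sep <:+: rest := by
        obtain ⟨j, hj⟩ := (PySem.Chars.exists_prefix_drop_iff_isIn sep (c :: rest)).mpr
          ((PySem.Chars.isIn_iff_infix sep (c :: rest)).mpr h)
        cases j with
        | zero => exact absurd (by simpa using hj) hp
        | succ j' =>
          have : sep <+: rest.drop j' := by simpa using hj
          exact (PySem.Chars.isIn_iff_infix sep rest).mp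
            ((PySem.Chars.exists_prefix_drop_iff_isIn sep rest).mp ⟨j', this⟩)
      have hnnr : 0 ≤ PySem.Chars.find rest sep := (PySem.Chars.find_nonneg_iff rest sep).mpr hrest
      obtain ⟨hpre, hmin⟩ := PySem.Chars.find_spec hnnr
      set k' := (PySem.Chars.find rest sep).toNat with hk'
      have hf : PySem.Chars.find (c :: rest) sep = ((k' + 1 : Nat) : Int) := by
        apply find_eq_of
        · simpa using hpre
        · intro i hi
          cases i with
          | zero => simpa using hp
          | succ i' =>
            intro hbad
            exact hmin i' (by omega) (by simpa using hbad)
      rw [splitF]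
      simp only [hsep, hpb, ne_eq, not_false_eq_true, true_and]
      rw [ih hrest, hf]
      have h1 : (((k' + 1 : Nat) : Int)).toNat = k' + 1 := by omega
      rw [h1, show k' + 1 + sep.length = (k' + sep.length) + 1 from by omega]
      simp [List.take_succ_cons, List.drop_succ_cons]

-- the position after the first n non-overlapping occurrences of sep (additive mirror of A's loop)
def posAfter (sep : List Char) : List Char → Nat → Nat
  | _, 0 => 0
  | s, n + 1 =>
      let i := PySem.Chars.find s sep
      if i = -1 then 0 else i.toNat + sep.length + posAfter sep (s.drop (i.toNat + sep.length)) n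

theorem truncALoop_eq (s : List Char) :
    ∀ (n : Nat) (pos : Nat), pos ≤ s.length →
      truncALoop s pos n = pos + posAfter ['<','/','p','>'] (s.drop pos) n := by
  intro n
  induction n with
  | zero => intro pos _; simp [truncALoop, posAfter]
  | succ n ih =>
    intro pos hpos
    rw [truncALoop, posAfter]
    have hFF : PySem.Chars.findFrom s "</p>".toList (pos : Int)
        = if PySem.Chars.find (s.drop pos) ['<','/','p','>'] = -1 then -1
          else (pos : Int) + PySem.Chars.find (s.drop pos) ['<','/','p','>'] := by
      have := PySem.Chars.findFrom_natCast s ['<','/','p','>'] pos hpos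
      exact this
    by_cases hf : PySem.Chars.find (s.drop pos) ['<','/','p','>'] = -1
    · simp only [hFF, if_pos hf]
      simp
    · have hnn : 0 ≤ PySem.Chars.find (s.drop pos) ['<','/','p','>'] := by
        have := PySem.Chars.neg_one_le_find (s.drop pos) ['<','/','p','>']
        omega
      set f := PySem.Chars.find (s.drop pos) ['<','/','p','>'] with hfdef
      have hne : ¬ ((pos : Int) + f = -1) := by omega
      obtain ⟨hpre, _⟩ := PySem.Chars.find_spec hnn
      rw [← hfdef] at hpre
      have hlen : f.toNat + 4 ≤ (s.drop pos).length := by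
        have h4 := hpre.length_le
        simp only [List.length_drop, List.length_cons, List.length_nil] at h4 ⊢
        omega
      have hbound : pos + f.toNat + 4 ≤ s.length := by
        rw [List.length_drop] at hlen
        omega
      have htn : ((pos : Int) + f).toNat = pos + f.toNat := by omega
      simp only [hFF, if_neg hf, if_neg hne, htn]
      rw [ih (pos + f.toNat + 4) hbound]
      rw [show (['<','/','p','>'] : List Char).length = 4 from rfl, List.drop_drop]
      have e : List.drop (pos + (f.toNat + 4)) s = List.drop (pos + f.toNat + 4) s := by
        rw [← Nat.add_assoc]
      rw [e]
      omega

theorem intercalate_cons₂ (sep x y : List Char) (xs : List (List Char)) :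
    sep.intercalate (x :: y :: xs) = x ++ sep ++ sep.intercalate (y :: xs) := by
  simp [List.intercalate]

theorem main_lemma (sep : List Char) (hsep : sep ≠ []) :
    ∀ (n : Nat) (s : List Char),
      (posAfter sep s n = 0 ↔ min n ((splitF sep s).length - 1) = 0) ∧
      (0 < min n ((splitF sep s).length - 1) →
        sep.intercalate ((splitF sep s).take (min n ((splitF sep s).length - 1))) ++ sep
          = s.take (posAfter sep s n)) := by
  intro n
  induction n with
  | zero => intro s; simp [posAfter]
  | succ n ih =>
    intro s
    by_cases hin : sep <:+: s
    · have hnn : 0 ≤ PySem.Chars.find s sep := (PySem.Chars.find_nonneg_iff s sep).mpr hin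
      have hfne : ¬ (PySem.Chars.find s sep = -1) := by omega
      obtain ⟨hpre, _⟩ := PySem.Chars.find_spec hnn
      set k := (PySem.Chars.find s sep).toNat with hk
      set s' := s.drop (k + sep.length) with hs'
      have hsplit : splitF sep s = s.take k :: splitF sep s' := splitF_of_infix sep hsep s hin
      have hD := splitF_ne_nil sep s'
      have hDlen : 1 ≤ (splitF sep s').length := List.length_pos_of_ne_nil hD
      have hsl : 1 ≤ sep.length := by
        cases sep with
        | nil => exact absurd rfl hsep
        | cons a t => simp
      have hpos : posAfter sep s (n+1) = k + sep.length + posAfter sep s' n := by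
        rw [posAfter]
        simp only [hfne, if_false]
        rw [← hk, ← hs']
      -- s decomposes as take k ++ sep ++ s'
      have hdropk : s.drop k = sep ++ s' := by
        obtain ⟨t, ht⟩ := hpre
        rw [hs', ← List.drop_drop, ← ht]
        simp
      have htake_km : s.take (k + sep.length) = s.take k ++ sep := by
        rw [List.take_add, hdropk, List.take_left' rfl]
      obtain ⟨ih1, ih2⟩ := ih s'
      have hsplit_take : ∀ p : Nat, List.take (k + sep.length + p) s
          = (List.take k s ++ sep) ++ List.take p s' := by
        intro p
        rw [List.take_add, htake_km, ← hs']
      constructor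
      · constructor
        · intro h; rw [hpos] at h; omega
        · intro h
          rw [hsplit, List.length_cons, Nat.add_sub_cancel] at h
          rw [hpos]
          omega
      · intro _
        rw [hsplit, hpos]
        have hq : min (n+1) ((List.take k s :: splitF sep s').length - 1)
            = (min n ((splitF sep s').length - 1)) + 1 := by
          simp; omega
        rw [hq]
        set q' := min n ((splitF sep s').length - 1) with hq'
        rw [List.take_succ_cons]
        by_cases hz : q' = 0
        · have hp0 : posAfter sep s' n = 0 := ih1.mpr (by omega)
          rw [hz, hp0, hsplit_take 0]
          simp [List.intercalate]
        · have hq1 : 0 < q' := by omega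
          have hDrest : (splitF sep s').take q' ≠ [] := by
            cases hc : splitF sep s' with
            | nil => exact absurd hc hD
            | cons a t => simp; omega
          cases hc : (splitF sep s').take q' with
          | nil => exact absurd hc hDrest
          | cons a t =>
            rw [hsplit_take (posAfter sep s' n), ← ih2 hq1, hc,
              intercalate_cons₂ sep (List.take k s) a t]
            simp [List.append_assoc]
    · have hsplit : splitF sep s = [s] := splitF_of_not_infix sep hsep s hin
      have hfe : PySem.Chars.find s sep = -1 := (PySem.Chars.find_eq_neg_one_iff s sep).mpr hin
      have hpos : posAfter sep s (n+1) = 0 := by rw [posAfter]; simp [hfe]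
      rw [hsplit, hpos]
      simp

-- ===== VERDICT (by name: the statement is the Claim_ definition above) =====
theorem truncate_html_preview_spec : Claim_equal_truncate_html_preview := by
  intro html m _
  unfold Spec_truncate_html_preview truncate_html_preview truncate_html_preview_alt
  have hL : "</p>".toList = ['<','/','p','>'] := by decide
  have hsep : (['<','/','p','>'] : List Char) ≠ [] := by decide
  rw [hL, splitOn_eq_splitF html.toList ['<','/','p','>'] hsep]
  have hbridge := truncALoop_eq html.toList m.toNat 0 (by omega)
  rw [List.drop_zero] at hbridge
  rw [hbridge]
  simp only [Nat.zero_add]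
  obtain ⟨h1, h2⟩ := main_lemma ['<','/','p','>'] hsep m.toNat html.toList
  have hPne := splitF_ne_nil ['<','/','p','>'] html.toList
  have hPlen : 1 ≤ (splitF ['<','/','p','>'] html.toList).length :=
    List.length_pos_of_ne_nil hPne
  by_cases hfound : 1 ≤ min m (((splitF ['<','/','p','>'] html.toList).length : Int) - 1)
  · have hq : 0 < min m.toNat ((splitF ['<','/','p','>'] html.toList).length - 1) := by
      omega
    have hqpos : 0 < posAfter ['<','/','p','>'] html.toList m.toNat := by
      rcases Nat.eq_zero_or_pos (posAfter ['<','/','p','>'] html.toList m.toNat) with h0 | h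
      · have := h1.mp h0; omega
      · exact h
    rw [if_pos hqpos, if_pos hfound]
    congr 1
    rw [PySem.List.slice_to_natCast]
    have hslice : PySem.List.slice (splitF ['<','/','p','>'] html.toList) none
        (some (min m (((splitF ['<','/','p','>'] html.toList).length : Int) - 1)))
        = (splitF ['<','/','p','>'] html.toList).take
            (min m.toNat ((splitF ['<','/','p','>'] html.toList).length - 1)) := by
      rw [PySem.List.slice_to _ (by omega)]
      congr 1
      omega
    rw [hslice]
    rw [show PySem.Chars.join ['<','/','p','>'] = List.intercalate ['<','/','p','>'] from rfl]
    exact (h2 hq).symm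
  · have hp0 : posAfter ['<','/','p','>'] html.toList m.toNat = 0 := h1.mpr (by omega)
    rw [hp0, if_neg (by omega), if_neg hfound]
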